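-- pv_equiv track=rewrite | github.com/pyccel/pyccel | tests/epyccel/modules/loops.py | double_loop
-- ===== SOURCE A (Python) =====
-- def double_loop(n : int):
--     x = 0
--     for i in range( 3, 10 ): # pylint: disable=unused-variable
--         x += 1
--         y  = n*x
--         for j in range( 4, 15 ): # pylint: disable=unused-variable
--             z = x-y
--     return z
-- ===== SOURCE B (Python) =====
-- def double_loop(n: int):
--     # closed form: outer loop leaves x=7, y=7*n, inner loop sets z=x-y
--     return 7 - 7 * n
-- ===== Notes on version B (the rewrite author's own statement) =====
-- stated objective: simpler
-- what changed: Replaced the fixed nested constant-bound loops with the equivalent closed-form arithmetic expression.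
import Mathlib
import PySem

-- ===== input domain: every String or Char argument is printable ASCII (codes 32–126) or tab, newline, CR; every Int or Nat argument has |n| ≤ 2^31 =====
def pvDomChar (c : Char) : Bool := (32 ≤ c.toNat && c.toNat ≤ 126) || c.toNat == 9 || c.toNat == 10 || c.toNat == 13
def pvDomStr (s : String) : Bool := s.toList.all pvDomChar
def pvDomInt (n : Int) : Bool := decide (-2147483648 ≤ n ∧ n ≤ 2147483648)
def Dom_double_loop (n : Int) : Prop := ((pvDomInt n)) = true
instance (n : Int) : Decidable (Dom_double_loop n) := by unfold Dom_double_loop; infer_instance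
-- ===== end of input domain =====

-- B replaces the fixed nested loops with the closed form 7 - 7*n (simpler; same values).

-- ===== PORT A =====
-- state: (x, z); z starts as 0-placeholder via Option to mirror being unassigned,
-- but the inner loop always runs, so we carry (x, z : Int × Option Int) literally.
def double_loop (n : Int) : Int :=
  let st := (PySem.List.pyRange 3 10 1).foldl
    (fun (st : Int × Option Int) (_i : Int) =>
      let x := st.1 + 1
      let y := n * x
      let z := (PySem.List.pyRange 4 15 1).foldl (fun (_z : Option Int) (_j : Int) => some (x - y)) st.2
      (x, z))
    ((0 : Int), (none : Option Int))
  st.2.getD 0   -- the inner loop always runs, so z is always assigned; getD is never the default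

-- ===== PORT B =====
def double_loop_alt (n : Int) : Int := 7 - 7 * n

-- ===== PRECONDITION & SPEC =====
def Spec_double_loop (n : Int) (out : Int) : Prop := out = double_loop_alt n
instance (n : Int) (out : Int) : Decidable (Spec_double_loop n out) := by unfold Spec_double_loop; infer_instance

-- ===== CLAIM (what is proved, stated in full; the proofs are below) =====
def Claim_equal_double_loop : Prop := ∀ (n : Int), Dom_double_loop n → Spec_double_loop n (double_loop n)

-- ===== LEMMAS AND PROOFS =====

-- ===== VERDICT (by name: the statement is the Claim_ definition above) =====
theorem double_loop_spec : Claim_equal_double_loop := by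
  intro n _
  show double_loop n = double_loop_alt n
  simp [double_loop, double_loop_alt, PySem.List.pyRange, List.range_succ]
  ring
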